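-- pv_equiv track=rewrite | github.com/Whakamua/wizard_AI | wizard_game.py | canonical_suit_map
-- ===== SOURCE A (Python) =====
-- NUM_COLORS = 4
--
-- NUM_VALUES = 13  # 1..13
--
-- WIZARD_START = NUM_COLORS * NUM_VALUES  # 52
--
-- def card_color(card: int) -> int:
--     """Return color index (0-3) for number cards, or -1 for wizard/jester."""
--     if card < WIZARD_START:
--         return card // NUM_VALUES
--     return -1
--
-- def canonical_suit_map(trump_color: int, hand_cards, play_history_cards=()) -> dict:
--     """Map original color indices to canonical indices.
--
--     Trump always maps to 0.  Non-trump suits map to 1, 2, 3 based on the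
--     order they first appear in the player's sorted hand, then the play
--     history.  Unseen suits are filled in ascending original-index order.
--     """
--     mapping = {}
--     if trump_color >= 0:
--         mapping[trump_color] = 0
--     next_id = 1 if trump_color >= 0 else 0
--     for card in list(sorted(hand_cards)) + list(play_history_cards):
--         c = card_color(card)
--         if c >= 0 and c not in mapping:
--             mapping[c] = next_id
--             next_id += 1
--     # Fill remaining unseen suits deterministically
--     for c in range(NUM_COLORS):
--         if c not in mapping:
--             mapping[c] = next_id
--             next_id += 1
--     return mapping
-- ===== SOURCE B (Python) =====
-- NUM_COLORS = 4
-- NUM_VALUES = 13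
-- WIZARD_START = NUM_COLORS * NUM_VALUES  # 52
--
-- def canonical_suit_map(trump_color: int, hand_cards, play_history_cards=()) -> dict:
--     """O(n) re-implementation: no sort.  In a sorted hand the suits first
--     appear in ascending color order (color = card // 13 is monotone on
--     number cards), so the hand pass reduces to a membership set plus one
--     ascending sweep over the 4 colors; then the history scan and fill."""
--     mapping = {}
--     next_id = 0
--     if trump_color >= 0:
--         mapping[trump_color] = 0
--         next_id = 1
--     seen = set()
--     for card in hand_cards:
--         if 0 <= card < WIZARD_START:
--             seen.add(card // NUM_VALUES)
--     for c in range(NUM_COLORS):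
--         if c in seen and c not in mapping:
--             mapping[c] = next_id
--             next_id += 1
--     for card in play_history_cards:
--         c = card // NUM_VALUES if 0 <= card < WIZARD_START else -1
--         if c >= 0 and c not in mapping:
--             mapping[c] = next_id
--             next_id += 1
--     for c in range(NUM_COLORS):
--         if c not in mapping:
--             mapping[c] = next_id
--             next_id += 1
--     return mapping
-- ===== Notes on version B (the rewrite author's own statement) =====
-- stated objective: faster
-- what changed: Replaces sorting the hand with one linear pass recording which suits occur, exploiting that color = card // 13 is monotone on number cards so first-appearance order in a sorted hand is just ascending color order; the sort disappears.
import Mathlib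
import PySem

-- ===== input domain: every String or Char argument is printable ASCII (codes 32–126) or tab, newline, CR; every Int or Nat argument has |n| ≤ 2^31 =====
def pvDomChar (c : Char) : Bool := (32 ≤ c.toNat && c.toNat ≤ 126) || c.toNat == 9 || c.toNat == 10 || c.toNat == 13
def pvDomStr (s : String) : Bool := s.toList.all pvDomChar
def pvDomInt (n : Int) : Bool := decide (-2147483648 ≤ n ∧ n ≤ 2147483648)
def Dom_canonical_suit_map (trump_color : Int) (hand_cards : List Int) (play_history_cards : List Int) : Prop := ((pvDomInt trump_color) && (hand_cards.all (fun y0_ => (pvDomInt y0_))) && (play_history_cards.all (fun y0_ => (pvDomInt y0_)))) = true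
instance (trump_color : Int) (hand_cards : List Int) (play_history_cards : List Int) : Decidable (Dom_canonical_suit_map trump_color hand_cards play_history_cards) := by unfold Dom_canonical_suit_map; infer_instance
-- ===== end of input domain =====

-- B replaces A's sort of the hand by one linear membership pass (first-appearance
-- order in a sorted hand is just ascending color order); return value proved equal.

-- ===== PORT A =====
def card_color (card : Int) : Int :=
  if card < 52 then PySem.Int.floordiv card 13 else -1

def canonical_suit_map (trump_color : Int) (hand_cards : List Int) (play_history_cards : List Int) : List (Int × Int) :=
  let m0 : PySem.Dict Int Int := if trump_color ≥ 0 then PySem.Dict.insert PySem.Dict.empty trump_color 0 else PySem.Dict.empty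
  let n0 : Int := if trump_color ≥ 0 then 1 else 0
  let s1 := (PySem.List.sorted hand_cards (fun x => x) false ++ play_history_cards).foldl
    (fun st card =>
      if card_color card ≥ 0 ∧ PySem.Dict.contains st.1 (card_color card) = false then
        (PySem.Dict.insert st.1 (card_color card) st.2, st.2 + 1)
      else st)
    (m0, n0)
  let s2 := (PySem.List.pyRange 0 4 1).foldl
    (fun st c =>
      if PySem.Dict.contains st.1 c = false then (PySem.Dict.insert st.1 c st.2, st.2 + 1) else st)
    s1
  PySem.Dict.items s2.1

-- ===== PORT B =====
def canonical_suit_map_alt (trump_color : Int) (hand_cards : List Int) (play_history_cards : List Int) : List (Int × Int) :=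
  let m0 : PySem.Dict Int Int := if trump_color ≥ 0 then PySem.Dict.insert PySem.Dict.empty trump_color 0 else PySem.Dict.empty
  let n0 : Int := if trump_color ≥ 0 then 1 else 0
  let seen : PySem.Set Int := hand_cards.foldl
    (fun s card => if 0 ≤ card ∧ card < 52 then PySem.Set.add s (PySem.Int.floordiv card 13) else s)
    PySem.Set.empty
  let s1 := (PySem.List.pyRange 0 4 1).foldl
    (fun st c =>
      if c ∈ seen ∧ PySem.Dict.contains st.1 c = false then (PySem.Dict.insert st.1 c st.2, st.2 + 1) else st)
    (m0, n0)
  let s2 := play_history_cards.foldl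
    (fun st card =>
      if (if 0 ≤ card ∧ card < 52 then PySem.Int.floordiv card 13 else -1) ≥ 0 ∧
          PySem.Dict.contains st.1 (if 0 ≤ card ∧ card < 52 then PySem.Int.floordiv card 13 else -1) = false then
        (PySem.Dict.insert st.1 (if 0 ≤ card ∧ card < 52 then PySem.Int.floordiv card 13 else -1) st.2, st.2 + 1)
      else st)
    s1
  let s3 := (PySem.List.pyRange 0 4 1).foldl
    (fun st c =>
      if PySem.Dict.contains st.1 c = false then (PySem.Dict.insert st.1 c st.2, st.2 + 1) else st)
    s2
  PySem.Dict.items s3.1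

-- ===== PRECONDITION & SPEC =====
def Spec_canonical_suit_map (trump_color : Int) (hand_cards : List Int) (play_history_cards : List Int) (out : List (Int × Int)) : Prop := out = canonical_suit_map_alt trump_color hand_cards play_history_cards
instance (trump_color : Int) (hand_cards : List Int) (play_history_cards : List Int) (out : List (Int × Int)) : Decidable (Spec_canonical_suit_map trump_color hand_cards play_history_cards out) := by unfold Spec_canonical_suit_map; infer_instance

-- ===== CLAIM (what is proved, stated in full; the proofs are below) =====
def Claim_equal_canonical_suit_map : Prop := ∀ (trump_color : Int) (hand_cards : List Int) (play_history_cards : List Int), Dom_canonical_suit_map trump_color hand_cards play_history_cards → Spec_canonical_suit_map trump_color hand_cards play_history_cards (canonical_suit_map trump_color hand_cards play_history_cards)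

-- ===== LEMMAS AND PROOFS =====

-- the single dict-building step both programs share: assign the next id to a fresh color
def csmStep (st : PySem.Dict Int Int × Int) (c : Int) : PySem.Dict Int Int × Int :=
  if PySem.Dict.contains st.1 c = false then (PySem.Dict.insert st.1 c st.2, st.2 + 1) else st

-- the color of a number card (none for wizards/jesters/invalid)
def toColor? (card : Int) : Option Int :=
  if 0 ≤ card ∧ card < 52 then some (PySem.Int.floordiv card 13) else none

lemma floordiv13_bounds (a : Int) :
    (PySem.Int.floordiv a 13) * 13 ≤ a ∧ a < (PySem.Int.floordiv a 13 + 1) * 13 :=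
  (PySem.Int.floordiv_eq_iff_of_pos (by norm_num)).mp rfl

lemma toColor?_bounds {a c : Int} (h : toColor? a = some c) : 0 ≤ c ∧ c < 4 := by
  unfold toColor? at h
  split at h
  · rename_i hc
    obtain rfl : PySem.Int.floordiv a 13 = c := by injection h
    have := floordiv13_bounds a
    omega
  · exact absurd h (by simp)

lemma toColor?_mono {a b c d : Int} (hab : a ≤ b) (ha : toColor? a = some c)
    (hb : toColor? b = some d) : c ≤ d := by
  unfold toColor? at ha hb
  split at ha
  · split at hb
    · obtain rfl : PySem.Int.floordiv a 13 = c := by injection ha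
      obtain rfl : PySem.Int.floordiv b 13 = d := by injection hb
      have h1 := floordiv13_bounds a
      have h2 := floordiv13_bounds b
      omega
    · exact absurd hb (by simp)
  · exact absurd ha (by simp)

-- A's loop body, rewritten through toColor?
lemma stepA_eq_elim (st : PySem.Dict Int Int × Int) (card : Int) :
    (if card_color card ≥ 0 ∧ PySem.Dict.contains st.1 (card_color card) = false then
        (PySem.Dict.insert st.1 (card_color card) st.2, st.2 + 1)
      else st)
    = (toColor? card).elim st (csmStep st) := by
  by_cases h : 0 ≤ card ∧ card < 52
  · have hdb := floordiv13_bounds card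
    have h2 : card_color card ≥ 0 := by unfold card_color; rw [if_pos h.2]; omega
    simp only [card_color, toColor?, csmStep, if_pos h, if_pos h.2, Option.elim]
    by_cases hc : PySem.Dict.contains st.1 (PySem.Int.floordiv card 13) = false
    · rw [if_pos ⟨by omega, hc⟩, if_pos hc]
    · rw [if_neg (by tauto), if_neg hc]
  · simp only [toColor?, if_neg h, Option.elim]
    by_cases h52 : card < 52
    · have hdb := floordiv13_bounds card
      have : ¬ (card_color card ≥ 0) := by unfold card_color; rw [if_pos h52]; omega
      rw [if_neg (by tauto)]
    · have : ¬ (card_color card ≥ 0) := by unfold card_color; rw [if_neg h52]; omega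
      rw [if_neg (by tauto)]

-- B's history loop body equals A's
lemma stepB_eq_elim (st : PySem.Dict Int Int × Int) (card : Int) :
    (if (if 0 ≤ card ∧ card < 52 then PySem.Int.floordiv card 13 else -1) ≥ 0 ∧
          PySem.Dict.contains st.1 (if 0 ≤ card ∧ card < 52 then PySem.Int.floordiv card 13 else -1) = false then
        (PySem.Dict.insert st.1 (if 0 ≤ card ∧ card < 52 then PySem.Int.floordiv card 13 else -1) st.2, st.2 + 1)
      else st)
    = (toColor? card).elim st (csmStep st) := by
  by_cases h : 0 ≤ card ∧ card < 52
  · have hdb := floordiv13_bounds card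
    simp only [toColor?, csmStep, if_pos h, Option.elim]
    by_cases hc : PySem.Dict.contains st.1 (PySem.Int.floordiv card 13) = false
    · rw [if_pos ⟨by omega, hc⟩, if_pos hc]
    · rw [if_neg (by tauto), if_neg hc]
  · simp only [toColor?, if_neg h, Option.elim]
    rw [if_neg (by norm_num)]

-- a fold whose body dispatches on toColor? is a fold over the color sequence
lemma foldl_elim_filterMap {β : Type} (g : β → Int → β) (l : List Int) (init : β) :
    l.foldl (fun acc card => (toColor? card).elim acc (g acc)) init
      = (l.filterMap toColor?).foldl g init := by
  induction l generalizing init with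
  | nil => rfl
  | cons x xs ih =>
    cases h : toColor? x with
    | none => rw [List.foldl_cons, List.filterMap_cons, h]; simpa using ih init
    | some c => rw [List.foldl_cons, List.filterMap_cons, h]; simpa using ih (g init c)

-- remove duplicates keeping first occurrences (fuel-based, proof-side only)
def ddfAux : Nat → List Int → List Int
  | 0, _ => []
  | _ + 1, [] => []
  | n + 1, x :: xs => x :: ddfAux n (xs.filter (fun y => decide (y ≠ x)))

def ddf (l : List Int) : List Int := ddfAux l.length l

lemma mem_ddfAux : ∀ (n : Nat) (l : List Int), l.length ≤ n → ∀ x, (x ∈ ddfAux n l ↔ x ∈ l) := by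
  intro n
  induction n with
  | zero =>
    intro l h x
    rw [List.length_eq_zero_iff.mp (Nat.le_zero.mp h)]
    simp [ddfAux]
  | succ n ih =>
    intro l h x
    cases l with
    | nil => simp [ddfAux]
    | cons a xs =>
      have hlen : (xs.filter (fun y => decide (y ≠ a))).length ≤ n :=
        le_trans (List.length_filter_le _ _) (by simpa using h)
      simp only [ddfAux, List.mem_cons, ih _ hlen x, List.mem_filter, decide_eq_true_eq]
      constructor
      · rintro (rfl | ⟨hm, _⟩)
        · exact Or.inl rfl
        · exact Or.inr hm
      · rintro (rfl | hm)
        · exact Or.inl rfl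
        · by_cases hx : x = a
          · exact Or.inl hx
          · exact Or.inr ⟨hm, hx⟩

lemma pairwise_lt_ddfAux : ∀ (n : Nat) (l : List Int), l.length ≤ n →
    l.Pairwise (· ≤ ·) → (ddfAux n l).Pairwise (· < ·) := by
  intro n
  induction n with
  | zero => intro l _ _; simp [ddfAux]
  | succ n ih =>
    intro l h hp
    cases l with
    | nil => simp [ddfAux]
    | cons a xs =>
      have hlen : (xs.filter (fun y => decide (y ≠ a))).length ≤ n :=
        le_trans (List.length_filter_le _ _) (by simpa using h)
      rw [List.pairwise_cons] at hp
      simp only [ddfAux, List.pairwise_cons]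
      refine ⟨?_, ih _ hlen (List.Pairwise.filter _ hp.2)⟩
      intro y hy
      rw [mem_ddfAux _ _ hlen, List.mem_filter, decide_eq_true_eq] at hy
      exact lt_of_le_of_ne (hp.1 y hy.1) (Ne.symm hy.2)

lemma contains_csmStep (st : PySem.Dict Int Int × Int) (c x : Int)
    (h : PySem.Dict.contains st.1 x = true) : PySem.Dict.contains (csmStep st c).1 x = true := by
  unfold csmStep
  split
  · simp [PySem.Dict.contains_insert, h]
  · exact h

lemma foldl_csmStep_skip (xs : List Int) (st : PySem.Dict Int Int × Int) (x : Int)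
    (h : PySem.Dict.contains st.1 x = true) :
    xs.foldl csmStep st = (xs.filter (fun y => decide (y ≠ x))).foldl csmStep st := by
  induction xs generalizing st with
  | nil => rfl
  | cons y ys ih =>
    by_cases hyx : y = x
    · subst hyx
      have hskip : csmStep st y = st := by unfold csmStep; rw [if_neg (by simp [h])]
      rw [List.filter_cons_of_neg (by simp), List.foldl_cons, hskip]
      exact ih st h
    · rw [List.filter_cons_of_pos (by simp [hyx]), List.foldl_cons, List.foldl_cons]
      exact ih (csmStep st y) (contains_csmStep st y x h)

lemma foldl_csmStep_ddfAux : ∀ (n : Nat) (l : List Int), l.length ≤ n →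
    ∀ (st : PySem.Dict Int Int × Int), l.foldl csmStep st = (ddfAux n l).foldl csmStep st := by
  intro n
  induction n with
  | zero =>
    intro l h st
    rw [List.length_eq_zero_iff.mp (Nat.le_zero.mp h)]
    rfl
  | succ n ih =>
    intro l h st
    cases l with
    | nil => rfl
    | cons x xs =>
      have hlen : (xs.filter (fun y => decide (y ≠ x))).length ≤ n :=
        le_trans (List.length_filter_le _ _) (by simpa using h)
      simp only [ddfAux, List.foldl_cons]
      have hx : PySem.Dict.contains (csmStep st x).1 x = true := by
        unfold csmStep
        split
        · simp
        · rename_i hc; simpa using hc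
      rw [foldl_csmStep_skip xs (csmStep st x) x hx, ih _ hlen (csmStep st x)]

lemma foldl_csmStep_ddf (l : List Int) (st : PySem.Dict Int Int × Int) :
    l.foldl csmStep st = (ddf l).foldl csmStep st :=
  foldl_csmStep_ddfAux l.length l le_rfl st

-- the heart of the claim: in a sorted hand the suits first appear in ascending color order
lemma hand_order (hand : List Int) :
    ddf ((PySem.List.sorted hand (fun x => x) false).filterMap toColor?) =
    ([0, 1, 2, 3] : List Int).filter (fun c => decide (c ∈ hand.filterMap toColor?)) := by
  have hsort : (PySem.List.sorted hand (fun x => x) false).Pairwise (· ≤ ·) :=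
    PySem.List.sorted_pairwise hand (fun x => x)
  have hcs : ((PySem.List.sorted hand (fun x => x) false).filterMap toColor?).Pairwise (· ≤ ·) :=
    List.Pairwise.filterMap toColor?
      (fun a a' hle b hb b' hb' => toColor?_mono hle hb hb') hsort
  have hL : (ddf ((PySem.List.sorted hand (fun x => x) false).filterMap toColor?)).Pairwise (· < ·) :=
    pairwise_lt_ddfAux _ _ le_rfl hcs
  have hR : (([0, 1, 2, 3] : List Int).filter (fun c => decide (c ∈ hand.filterMap toColor?))).Pairwise (· < ·) :=
    List.Pairwise.filter _ (by decide)
  have hmem : ∀ x, x ∈ ddf ((PySem.List.sorted hand (fun x => x) false).filterMap toColor?) ↔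
      x ∈ ([0, 1, 2, 3] : List Int).filter (fun c => decide (c ∈ hand.filterMap toColor?)) := by
    intro x
    rw [ddf, mem_ddfAux _ _ le_rfl, List.mem_filter]
    simp only [List.mem_filterMap, PySem.List.mem_sorted, decide_eq_true_eq]
    constructor
    · rintro ⟨a, ha, hc⟩
      have hb := toColor?_bounds hc
      exact ⟨by simp only [List.mem_cons]; omega, ⟨a, ha, hc⟩⟩
    · rintro ⟨_, a, ha, hc⟩
      exact ⟨a, ha, hc⟩
  haveI : Std.Antisymm (fun (a b : Int) => a < b) :=
    ⟨fun a b h1 h2 => absurd h2 (not_lt.mpr (le_of_lt h1))⟩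
  exact List.Perm.eq_of_pairwise' hL hR
    ((List.perm_ext_iff_of_nodup
      (hL.imp fun h => ne_of_lt h) (hR.imp fun h => ne_of_lt h)).mpr hmem)

lemma seen_eq (hand : List Int) :
    hand.foldl
      (fun s card => if 0 ≤ card ∧ card < 52 then PySem.Set.add s (PySem.Int.floordiv card 13) else s)
      PySem.Set.empty = PySem.Set.ofList (hand.filterMap toColor?) := by
  have hfun : (fun (s : PySem.Set Int) card =>
      if 0 ≤ card ∧ card < 52 then PySem.Set.add s (PySem.Int.floordiv card 13) else s)
      = fun s card => (toColor? card).elim s (PySem.Set.add s) := by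
    funext s card
    unfold toColor?
    by_cases h : 0 ≤ card ∧ card < 52 <;> simp [h, Option.elim]
  rw [hfun, foldl_elim_filterMap, PySem.Set.ofList_eq_foldl]
  rfl

-- the two programs reach the same state after hand + history processing
lemma states_eq (hand hist : List Int) (st : PySem.Dict Int Int × Int) :
    (PySem.List.sorted hand (fun x => x) false ++ hist).foldl
      (fun st card =>
        if card_color card ≥ 0 ∧ PySem.Dict.contains st.1 (card_color card) = false then
          (PySem.Dict.insert st.1 (card_color card) st.2, st.2 + 1)
        else st) st
    = hist.foldl
        (fun st card =>
          if (if 0 ≤ card ∧ card < 52 then PySem.Int.floordiv card 13 else -1) ≥ 0 ∧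
              PySem.Dict.contains st.1 (if 0 ≤ card ∧ card < 52 then PySem.Int.floordiv card 13 else -1) = false then
            (PySem.Dict.insert st.1 (if 0 ≤ card ∧ card < 52 then PySem.Int.floordiv card 13 else -1) st.2, st.2 + 1)
          else st)
        ((PySem.List.pyRange 0 4 1).foldl
          (fun st c =>
            if c ∈ hand.foldl
                (fun s card => if 0 ≤ card ∧ card < 52 then PySem.Set.add s (PySem.Int.floordiv card 13) else s)
                PySem.Set.empty ∧ PySem.Dict.contains st.1 c = false then
              (PySem.Dict.insert st.1 c st.2, st.2 + 1)
            else st) st) := by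
  rw [List.foldl_append]
  have hA : (fun (st : PySem.Dict Int Int × Int) card =>
      if card_color card ≥ 0 ∧ PySem.Dict.contains st.1 (card_color card) = false then
        (PySem.Dict.insert st.1 (card_color card) st.2, st.2 + 1)
      else st) = fun st card => (toColor? card).elim st (csmStep st) := by
    funext st card; exact stepA_eq_elim st card
  have hB : (fun (st : PySem.Dict Int Int × Int) card =>
      if (if 0 ≤ card ∧ card < 52 then PySem.Int.floordiv card 13 else -1) ≥ 0 ∧
          PySem.Dict.contains st.1 (if 0 ≤ card ∧ card < 52 then PySem.Int.floordiv card 13 else -1) = false then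
        (PySem.Dict.insert st.1 (if 0 ≤ card ∧ card < 52 then PySem.Int.floordiv card 13 else -1) st.2, st.2 + 1)
      else st) = fun st card => (toColor? card).elim st (csmStep st) := by
    funext st card; exact stepB_eq_elim st card
  rw [hA, hB]
  congr 1
  rw [foldl_elim_filterMap, foldl_csmStep_ddf, hand_order, seen_eq]
  have hrange : PySem.List.pyRange 0 4 1 = ([0, 1, 2, 3] : List Int) := by decide
  rw [hrange]
  have hfun : (fun (st : PySem.Dict Int Int × Int) c =>
      if c ∈ PySem.Set.ofList (hand.filterMap toColor?) ∧ PySem.Dict.contains st.1 c = false then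
        (PySem.Dict.insert st.1 c st.2, st.2 + 1)
      else st)
      = fun st c => if c ∈ hand.filterMap toColor? then csmStep st c else st := by
    funext st c
    unfold csmStep
    by_cases h1 : c ∈ PySem.Set.ofList (hand.filterMap toColor?)
    · have h1' : c ∈ hand.filterMap toColor? := by rwa [PySem.Set.mem_ofList] at h1
      rw [if_pos h1']
      by_cases h2 : PySem.Dict.contains st.1 c = false
      · rw [if_pos ⟨h1, h2⟩, if_pos h2]
      · rw [if_neg (by tauto), if_neg h2]
    · have h1' : c ∉ hand.filterMap toColor? := by rwa [PySem.Set.mem_ofList] at h1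
      rw [if_neg h1', if_neg (by tauto)]
  rw [hfun, PySem.List.foldl_ite_eq_foldl_filter]

-- ===== VERDICT (by name: the statement is the Claim_ definition above) =====
theorem canonical_suit_map_spec : Claim_equal_canonical_suit_map := by
  intro trump_color hand_cards play_history_cards _
  show canonical_suit_map trump_color hand_cards play_history_cards
      = canonical_suit_map_alt trump_color hand_cards play_history_cards
  simp only [canonical_suit_map, canonical_suit_map_alt]
  rw [states_eq]
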